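-- pv_equiv track=rewrite | github.com/miliar/Code_Jam_Webscraper | solutions_python/solutions_year17_round0_nr3/1284.py | solve
-- ===== SOURCE A (Python) =====
-- def solve(size, k):
--   if (size <= 0):
--     return (0, 0)
--
--   if (k == 1):
--     if (size%2 == 1):
--       return ((size-1)//2, (size-1)//2)
--     return (size//2, (size//2 -1))
--
--
--   if (k%2 == 0):
--     if (size%2 == 1):
--       return solve((size-1)//2, k//2)
--     else:
--       return solve((size//2), k//2)
--   else:
--     if (size%2 == 1):
--       return solve((size-1)//2, (k-1)//2)
--     else:
--       return solve(size//2 - 1, (k - 1)//2)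
-- ===== SOURCE B (Python) =====
-- def solve(size, k):
--     # Closed form: the k-th descent keeps halving; the surviving gap is
--     # (size - k + 2**d) >> d with d = bit_length(k) - 1, then split once.
--     if k <= 0:
--         return (0, 0)
--     d = k.bit_length() - 1
--     s = (size - k + (1 << d)) >> d
--     if s <= 0:
--         return (0, 0)
--     if s % 2 == 1:
--         return ((s - 1) // 2, (s - 1) // 2)
--     return (s // 2, s // 2 - 1)
-- ===== Notes on version B (the rewrite author's own statement) =====
-- stated objective: alternative
-- what changed: Replaces A's O(log k) recursive descent (halving size and k with parity branches) by a closed form: the surviving gap is (size - k + 2**d) >> d with d = k.bit_length() - 1, then split once.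
import Mathlib
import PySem

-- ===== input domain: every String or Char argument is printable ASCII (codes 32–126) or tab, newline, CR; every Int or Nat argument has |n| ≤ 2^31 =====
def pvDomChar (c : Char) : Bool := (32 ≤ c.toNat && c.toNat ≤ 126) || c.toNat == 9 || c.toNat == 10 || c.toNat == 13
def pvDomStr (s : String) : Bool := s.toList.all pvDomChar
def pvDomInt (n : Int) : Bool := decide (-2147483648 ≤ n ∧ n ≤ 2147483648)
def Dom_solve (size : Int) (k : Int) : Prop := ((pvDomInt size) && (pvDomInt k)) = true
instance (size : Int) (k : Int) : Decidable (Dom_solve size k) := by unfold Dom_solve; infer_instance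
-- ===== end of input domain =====

-- B replaces A's recursive descent by a closed form: the surviving gap size is
-- (size - k + 2^d) >> d with d = bit_length(k) - 1 (alternative algorithm; O(1) arithmetic steps).

-- ===== PORT A =====
def solve (size : Int) (k : Int) : Int × Int :=
  if size ≤ 0 then (0, 0)
  else if k = 1 then
    if PySem.Int.mod size 2 = 1 then
      (PySem.Int.floordiv (size - 1) 2, PySem.Int.floordiv (size - 1) 2)
    else
      (PySem.Int.floordiv size 2, PySem.Int.floordiv size 2 - 1)
  else if PySem.Int.mod k 2 = 0 then
    if PySem.Int.mod size 2 = 1 then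
      solve (PySem.Int.floordiv (size - 1) 2) (PySem.Int.floordiv k 2)
    else
      solve (PySem.Int.floordiv size 2) (PySem.Int.floordiv k 2)
  else
    if PySem.Int.mod size 2 = 1 then
      solve (PySem.Int.floordiv (size - 1) 2) (PySem.Int.floordiv (k - 1) 2)
    else
      solve (PySem.Int.floordiv size 2 - 1) (PySem.Int.floordiv (k - 1) 2)
termination_by size.toNat
decreasing_by
  all_goals simp only [PySem.Int.floordiv_eq_ediv_of_pos (by norm_num : (0:Int) < 2)]; omega

-- ===== PORT B =====
-- 1 << d is ported as (2^d : Int); x >> d (arithmetic shift) as floor division by 2^d (exact).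
def solve_alt (size : Int) (k : Int) : Int × Int :=
  if k ≤ 0 then (0, 0)
  else
    let d : Nat := PySem.Int.bitLength k - 1
    let s : Int := PySem.Int.floordiv (size - k + 2 ^ d) (2 ^ d)
    if s ≤ 0 then (0, 0)
    else if PySem.Int.mod s 2 = 1 then
      (PySem.Int.floordiv (s - 1) 2, PySem.Int.floordiv (s - 1) 2)
    else
      (PySem.Int.floordiv s 2, PySem.Int.floordiv s 2 - 1)

-- ===== PRECONDITION & SPEC =====
def Spec_solve (size : Int) (k : Int) (out : Int × Int) : Prop := out = solve_alt size k
instance (size : Int) (k : Int) (out : Int × Int) : Decidable (Spec_solve size k out) := by unfold Spec_solve; infer_instance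

-- ===== CLAIM (what is proved, stated in full; the proofs are below) =====
def Claim_equal_solve : Prop := ∀ (size : Int) (k : Int), Dom_solve size k → Spec_solve size k (solve size k)

-- ===== LEMMAS AND PROOFS =====

theorem pv_fd2 (a : Int) : PySem.Int.floordiv a 2 = a / 2 :=
  PySem.Int.floordiv_eq_ediv_of_pos (by norm_num)

theorem pv_fdpow (a : Int) (d : Nat) : PySem.Int.floordiv a (2 ^ d) = a / (2 ^ d : Int) :=
  PySem.Int.floordiv_eq_ediv_of_pos (by positivity)

theorem pv_mod2 (a : Int) : PySem.Int.mod a 2 = a % 2 :=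
  PySem.Int.mod_eq_emod_of_pos (by norm_num)

-- composition: (a/2 + c) / 2^e = (a + 2c) / 2^(e+1)
theorem pv_compose (a c : Int) (e : Nat) :
    (a / 2 + c) / (2 ^ e : Int) = (a + 2 * c) / (2 ^ (e + 1) : Int) := by
  have h1 : (a + 2 * c) / (2 : Int) = a / 2 + c := by
    rw [show a + 2 * c = a + c * 2 by ring, Int.add_mul_ediv_right _ _ (by norm_num : (2:Int) ≠ 0)]
  rw [← h1, Int.ediv_ediv_of_nonneg (by norm_num), pow_succ]; ring_nf

-- for odd N and d ≥ 1: (N-1)/2^d = N/2^d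
theorem pv_sub_one_div (N : Int) (d : Nat) (hd : 1 ≤ d) (hN : N % 2 = 1) :
    (N - 1) / (2 ^ d : Int) = N / (2 ^ d : Int) := by
  have hdvd : (2 : Int) ∣ 2 ^ d := dvd_pow_self 2 (by omega)
  have hpos : (0 : Int) < 2 ^ d := by positivity
  have hr : N % 2 ^ d % 2 = N % 2 := Int.emod_emod_of_dvd N hdvd
  have hrb : 0 ≤ N % 2 ^ d ∧ N % 2 ^ d < 2 ^ d := ⟨Int.emod_nonneg N (by positivity), Int.emod_lt_of_pos N hpos⟩
  have hrodd : N % 2 ^ d % 2 = 1 := by rw [hr]; exact hN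
  have h1 : 1 ≤ N % 2 ^ d := by omega
  have hN' : N - 1 = (N % 2 ^ d - 1) + (N / 2 ^ d) * 2 ^ d := by
    linarith [Int.mul_ediv_add_emod N (2 ^ d)]
  rw [hN', Int.add_mul_ediv_right _ _ (by positivity : (2:Int)^d ≠ 0)]
  rw [Int.ediv_eq_zero_of_lt (by omega) (by omega)]
  omega

theorem pv_two_pow_le (k : Int) (hk : 1 ≤ k) : (2 ^ (PySem.Int.bitLength k - 1) : Int) ≤ k := by
  have h := PySem.Int.two_pow_bitLength_le k (by omega)
  have : (k.natAbs : Int) = k := Int.natAbs_of_nonneg (by omega)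
  calc (2 ^ (PySem.Int.bitLength k - 1) : Int) = ((2 ^ (PySem.Int.bitLength k - 1) : Nat) : Int) := by push_cast; ring
    _ ≤ (k.natAbs : Int) := by exact_mod_cast h
    _ = k := this

-- when k ≤ 0, A's recursion can only bottom out at the size ≤ 0 base case
theorem pv_solve_nonpos : ∀ (n : Nat) (size k : Int), size.toNat = n → k ≤ 0 → solve size k = (0, 0) := by
  intro n
  induction n using Nat.strong_induction_on with
  | _ n ih =>
    intro size k hn hk
    rw [solve]
    split_ifs with h1 h2 h3 h4 h5
    · rfl
    · omega
    · omega
    · exact ih _ (by simp only [pv_fd2]; omega) _ _ rfl (by simp only [pv_fd2]; omega)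
    · exact ih _ (by simp only [pv_fd2]; omega) _ _ rfl (by simp only [pv_fd2]; omega)
    · exact ih _ (by simp only [pv_fd2]; omega) _ _ rfl (by simp only [pv_fd2]; omega)
    · exact ih _ (by simp only [pv_fd2]; omega) _ _ rfl (by simp only [pv_fd2]; omega)

-- closed-form tail: split the surviving gap once
def pvFinal (s : Int) : Int × Int :=
  if s ≤ 0 then (0, 0)
  else if s % 2 = 1 then ((s - 1) / 2, (s - 1) / 2) else (s / 2, s / 2 - 1)

theorem pv_alt_pos (size k : Int) (hk : 1 ≤ k) :
    solve_alt size k = pvFinal ((size - k + 2 ^ (PySem.Int.bitLength k - 1)) /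
      (2 ^ (PySem.Int.bitLength k - 1) : Int)) := by
  unfold solve_alt pvFinal
  rw [if_neg (by omega)]
  simp only [pv_fdpow, pv_fd2, pv_mod2]

-- main lemma: for k ≥ 1 the recursion computes the closed form
theorem pv_solve_pos : ∀ (n : Nat) (k size : Int), k.toNat = n → 1 ≤ k →
    solve size k = pvFinal ((size - k + 2 ^ (PySem.Int.bitLength k - 1)) /
      (2 ^ (PySem.Int.bitLength k - 1) : Int)) := by
  intro n
  induction n using Nat.strong_induction_on with
  | _ n ih =>
    intro k size hn hk
    by_cases hk1 : k = 1
    · subst hk1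
      rw [show PySem.Int.bitLength 1 = 1 from by decide]
      simp only [Nat.sub_self, pow_zero, Int.ediv_one]
      rw [show size - 1 + 1 = size from by ring, solve, pvFinal]
      simp
    · have hk2 : 2 ≤ k := by omega
      have hKpos : (1 : Int) ≤ k / 2 := by omega
      have hbl := PySem.Int.bitLength_of_pos (show (0:Int) < k by omega)
      rw [pv_fd2] at hbl
      have hble := PySem.Int.bitLength_of_pos (show (0:Int) < k / 2 by omega)
      have hbl1 : 1 ≤ PySem.Int.bitLength (k / 2) := by omega
      set e : Nat := PySem.Int.bitLength (k / 2) - 1 with he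
      have hd : PySem.Int.bitLength k - 1 = e + 1 := by omega
      have hP : ((2:Int) ^ (e + 1)) % 2 = 0 := by
        rw [pow_succ]; exact Int.mul_emod_left _ 2
      have htow : (2 ^ e : Int) ≤ k / 2 := by
        have := pv_two_pow_le (k / 2) hKpos; rwa [← he] at this
      have hIH : ∀ s1 : Int, solve s1 (k / 2) = pvFinal ((s1 - k / 2 + 2 ^ e) / (2 ^ e : Int)) := by
        intro s1
        have := ih (k / 2).toNat (by omega) (k / 2) s1 rfl hKpos
        rwa [← he] at this
      rw [hd]
      by_cases hs : size ≤ 0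
      · rw [solve, if_pos hs, pvFinal]
        have hnum : size - k + 2 ^ (e + 1) ≤ 0 := by
          have h2k : (2 ^ (e + 1) : Int) ≤ k := by
            have := pv_two_pow_le k hk; rwa [hd] at this
          omega
        have : (size - k + 2 ^ (e + 1)) / (2 ^ (e + 1) : Int) ≤ 0 := by
          calc (size - k + 2 ^ (e + 1)) / (2 ^ (e + 1) : Int)
              ≤ 0 / (2 ^ (e + 1) : Int) := Int.ediv_le_ediv (by positivity) hnum
            _ = 0 := Int.zero_ediv _
        rw [if_pos this]
      · rw [solve, if_neg hs, if_neg hk1]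
        simp only [pv_fd2, pv_mod2]
        split_ifs with hke hso hso
        · -- k even, size odd
          rw [show (size - 1) / 2 = size / 2 from by omega, hIH]
          congr 1
          rw [show size / 2 - k / 2 + 2 ^ e = size / 2 + (-(k / 2) + 2 ^ e) from by ring,
              pv_compose]
          congr 1
          rw [pow_succ]; omega
        · -- k even, size even
          rw [hIH]
          congr 1
          rw [show size / 2 - k / 2 + 2 ^ e = size / 2 + (-(k / 2) + 2 ^ e) from by ring,
              pv_compose]
          congr 1
          rw [pow_succ]; omega
        · -- k odd, size odd
          rw [show (size - 1) / 2 = size / 2 from by omega,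
              show (k - 1) / 2 = k / 2 from by omega, hIH]
          congr 1
          rw [show size / 2 - k / 2 + 2 ^ e = size / 2 + (-(k / 2) + 2 ^ e) from by ring,
              pv_compose,
              show size + 2 * (-(k / 2) + 2 ^ e) = size - k + 2 ^ (e + 1) + 1 from by
                rw [pow_succ]; omega]
          rw [← pv_sub_one_div (size - k + 2 ^ (e + 1) + 1) (e + 1) (by omega) (by omega)]
          congr 1
          ring
        · -- k odd, size even
          rw [show size / 2 - 1 = (size - 2) / 2 from by omega,
              show (k - 1) / 2 = k / 2 from by omega, hIH]
          congr 1
          rw [show (size - 2) / 2 - k / 2 + 2 ^ e = (size - 2) / 2 + (-(k / 2) + 2 ^ e) from by ring,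
              pv_compose,
              show size - 2 + 2 * (-(k / 2) + 2 ^ e) = size - k + 2 ^ (e + 1) - 1 from by
                rw [pow_succ]; omega,
              pv_sub_one_div (size - k + 2 ^ (e + 1)) (e + 1) (by omega) (by omega)]

theorem solve_spec : Claim_equal_solve := by
  intro size k _
  unfold Spec_solve
  by_cases hk : 1 ≤ k
  · rw [pv_alt_pos size k hk]
    exact pv_solve_pos k.toNat k size rfl hk
  · rw [pv_solve_nonpos size.toNat size k rfl (by omega)]
    unfold solve_alt
    rw [if_pos (by omega)]
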